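-- pv_equiv track=rewrite | github.com/Jarvis2021/gantry | src/core/fleet.py | _is_status_query
-- ===== SOURCE A (Python) =====
-- def _is_status_query(text: str) -> bool:
--     """Return True if the message looks like a request for build status."""
--     if not text or len(text.strip()) < 3:
--         return False
--     t = text.strip().lower()
--     patterns = (
--         "status",
--         "how is",
--         "how's",
--         "how are",
--         "how're",
--         "what is the status",
--         "what's the status",
--         "whats the status",
--         "is it done",
--         "is it ready",
--         "is it complete",
--         "is it finished",
--         "progress",
--         "how long",
--         "when will",
--         "how much longer",
--         "stauts",
--         "statut",
--         "statue ",  # common typos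
--     )
--     return any(p in t for p in patterns)
-- ===== SOURCE B (Python) =====
-- _PATTERNS = (
--     "status",
--     "how is",
--     "how's",
--     "how are",
--     "how're",
--     "what is the status",
--     "what's the status",
--     "whats the status",
--     "is it done",
--     "is it ready",
--     "is it complete",
--     "is it finished",
--     "progress",
--     "how long",
--     "when will",
--     "how much longer",
--     "stauts",
--     "statut",
--     "statue ",
-- )
--
--
-- def _is_status_query(text: str) -> bool:
--     """Return True if the message looks like a request for build status."""
--     if not text or len(text.strip()) < 3:
--         return False
--     t = text.strip().lower()
--     # single left-to-right scan over positions of t; at each position test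
--     # whether some pattern starts there
--     for i in range(len(t)):
--         for p in _PATTERNS:
--             if t.startswith(p, i):
--                 return True
--     return False
-- ===== Notes on version B (the rewrite author's own statement) =====
-- stated objective: alternative
-- what changed: A runs one full substring scan of t per pattern (any(p in t)); B makes a single left-to-right pass over the positions of t and at each position tests every pattern as a prefix there (t.startswith(p, i)), returning at the first hit.
import Mathlib
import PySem

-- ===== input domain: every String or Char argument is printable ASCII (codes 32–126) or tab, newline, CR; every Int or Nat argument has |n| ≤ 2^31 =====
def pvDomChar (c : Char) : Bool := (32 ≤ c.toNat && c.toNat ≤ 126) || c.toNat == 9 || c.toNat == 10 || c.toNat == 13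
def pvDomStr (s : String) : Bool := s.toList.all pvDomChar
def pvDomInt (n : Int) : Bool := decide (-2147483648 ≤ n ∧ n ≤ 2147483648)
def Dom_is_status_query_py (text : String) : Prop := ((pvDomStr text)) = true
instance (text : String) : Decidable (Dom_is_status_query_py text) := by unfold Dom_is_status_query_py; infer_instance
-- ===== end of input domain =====

-- B replaces A's per-pattern substring scans with one pass over the positions of t,
-- testing every pattern as a prefix at each position (alternative algorithm, same result).


-- ===== PORT A =====
def is_status_query_py (text : String) : Bool :=
  -- if not text or len(text.strip()) < 3: return False
  if text == "" || PySem.Str.len (PySem.Str.strip text) < 3 then false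
  else
    -- t = text.strip().lower()
    let t := PySem.Str.lower (PySem.Str.strip text)
    -- patterns = (…) ; return any(p in t for p in patterns)
    let patterns : List String :=
      ["status", "how is", "how's", "how are", "how're",
       "what is the status", "what's the status", "whats the status",
       "is it done", "is it ready", "is it complete", "is it finished",
       "progress", "how long", "when will", "how much longer",
       "stauts", "statut", "statue "]
    patterns.any (fun p => PySem.Str.isIn p t)

-- ===== PORT B =====
-- module-level _PATTERNS of Source B
def pvPatterns_alt : List String :=
  ["status", "how is", "how's", "how are", "how're",
   "what is the status", "what's the status", "whats the status",
   "is it done", "is it ready", "is it complete", "is it finished",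
   "progress", "how long", "when will", "how much longer",
   "stauts", "statut", "statue "]

def is_status_query_py_alt (text : String) : Bool :=
  if text == "" || PySem.Str.len (PySem.Str.strip text) < 3 then false
  else
    let t := (PySem.Str.lower (PySem.Str.strip text)).toList
    -- for i in range(len(t)): for p in _PATTERNS: if t.startswith(p, i): return True
    -- t.startswith(p, i) with 0 ≤ i < len(t) is exactly 'p.toList is a prefix of t.drop i'
    (List.range t.length).any (fun i =>
      pvPatterns_alt.any (fun p => PySem.Chars.startswith (t.drop i) p.toList))

-- ===== PRECONDITION & SPEC =====
def Spec_is_status_query_py (text : String) (out : Bool) : Prop := out = is_status_query_py_alt text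
instance (text : String) (out : Bool) : Decidable (Spec_is_status_query_py text out) := by unfold Spec_is_status_query_py; infer_instance

-- ===== CLAIM (what is proved, stated in full; the proofs are below) =====
def Claim_equal_is_status_query_py : Prop := ∀ (text : String), Dom_is_status_query_py text → Spec_is_status_query_py text (is_status_query_py text)

-- ===== LEMMAS AND PROOFS =====

-- the per-pattern substring test equals the positional prefix scan, whenever no pattern is empty
theorem pv_scan_eq (ps : List String) (h : ∀ p ∈ ps, p.toList ≠ []) (tl : List Char) :
    ps.any (fun p => PySem.Chars.isIn p.toList tl) =
    (List.range tl.length).any (fun i =>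
      ps.any (fun p => PySem.Chars.startswith (tl.drop i) p.toList)) := by
  rw [Bool.eq_iff_iff]
  simp only [List.any_eq_true, List.mem_range]
  constructor
  · rintro ⟨p, hp, hIn⟩
    obtain ⟨j, hpre⟩ := (PySem.Chars.exists_prefix_drop_iff_isIn p.toList tl).mpr hIn
    have hlen : p.toList.length ≤ tl.length - j := by
      simpa using hpre.length_le
    have hne := h p hp
    have hj : j < tl.length := by
      have : 1 ≤ p.toList.length := List.length_pos_iff.mpr hne
      omega
    exact ⟨j, hj, p, hp, (PySem.Chars.startswith_iff _ _).mpr hpre⟩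
  · rintro ⟨i, _, p, hp, hsw⟩
    refine ⟨p, hp, ?_⟩
    exact (PySem.Chars.exists_prefix_drop_iff_isIn p.toList tl).mp
      ⟨i, (PySem.Chars.startswith_iff _ _).mp hsw⟩

-- ===== VERDICT (by name: the statement is the Claim_ definition above) =====
theorem is_status_query_py_spec : Claim_equal_is_status_query_py := by
  intro text _
  unfold Spec_is_status_query_py is_status_query_py is_status_query_py_alt
  by_cases hg : (text == "" || PySem.Str.len (PySem.Str.strip text) < 3 : Bool) = true
  · rw [if_pos hg, if_pos hg]
  · rw [if_neg (by simpa using hg), if_neg (by simpa using hg)]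
    simp only [PySem.Str.isIn_eq]
    exact pv_scan_eq _ (by decide) _
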